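-- pv_equiv track=rewrite | github.com/jbkinney/24_posfai2 | posfai2.py | get_shifts_and_sizes
-- ===== SOURCE A (Python) =====
-- def get_shifts_and_sizes(spec_str, encoding_size):
--     """ inputs spec list. outputs a list of (spec, size, shift) """
--     spec_list = [x.split('x') for x in spec_str.split('+')]
--     specs = []
--     shift = 0
--     for x in spec_list:
--         if len(x)==1 and x[0]=='.':
--             size = 1
--         else:
--             size = encoding_size**len(x)
--         specs.append(('x'.join(x),size,shift))
--         shift += size
--     M = shift
--     return specs, M
-- ===== SOURCE B (Python) =====
-- def get_shifts_and_sizes(spec_str, encoding_size):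
--     """ inputs spec list. outputs a list of (spec, size, shift) """
--     # single character-level scan: no split/join/count; the size of the current
--     # part is maintained multiplicatively while its characters stream by
--     specs = []
--     shift = 0
--     buf = ''
--     size = encoding_size
--     for c in spec_str + '+':
--         if c == '+':
--             if buf == '.':
--                 size = 1
--             specs.append((buf, size, shift))
--             shift += size
--             buf = ''
--             size = encoding_size
--         else:
--             buf += c
--             if c == 'x':
--                 size *= encoding_size
--     return specs, shift
-- ===== Notes on version B (the rewrite author's own statement) =====
-- stated objective: alternative
-- what changed: Replaces A's split('+')/split('x')/join pipeline and its per-part fold by a single character-level state-machine scan over spec_str+'+' that accumulates the current part in a buffer and maintains its size multiplicatively (size *= encoding_size on each 'x'), flushing a (part,size,shift) triple at every '+'.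
import Mathlib
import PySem

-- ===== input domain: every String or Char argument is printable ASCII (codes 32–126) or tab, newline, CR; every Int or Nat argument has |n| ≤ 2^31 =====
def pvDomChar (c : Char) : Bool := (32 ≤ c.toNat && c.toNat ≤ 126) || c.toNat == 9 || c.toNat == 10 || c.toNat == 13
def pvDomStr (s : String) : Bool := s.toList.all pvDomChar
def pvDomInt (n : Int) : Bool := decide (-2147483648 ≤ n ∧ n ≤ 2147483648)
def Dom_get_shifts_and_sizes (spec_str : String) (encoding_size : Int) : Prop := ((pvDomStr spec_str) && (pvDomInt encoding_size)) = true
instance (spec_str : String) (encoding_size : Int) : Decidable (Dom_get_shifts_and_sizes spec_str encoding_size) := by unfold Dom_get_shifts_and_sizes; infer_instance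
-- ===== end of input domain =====

-- B replaces A's split/join/count pipeline by a single character-level state-machine
-- scan that maintains the current part's size multiplicatively; objective: alternative.

-- ===== PORT A =====
def get_shifts_and_sizes (spec_str : String) (encoding_size : Int) : (List (String × Int × Int)) × Int :=
  let spec_list := (PySem.Chars.splitOn spec_str.toList ['+']).map (fun x => PySem.Chars.splitOn x ['x'])
  let r := spec_list.foldl
    (fun (acc : List (String × Int × Int) × Int) x =>
      let size : Int := if x.length = 1 ∧ x.headD [] = ['.'] then 1 else encoding_size ^ x.length
      (acc.1 ++ [(String.ofList (PySem.Chars.join ['x'] x), size, acc.2)], acc.2 + size))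
    ([], 0)
  (r.1, r.2)

-- ===== PORT B =====
-- state = (specs, shift, buf, size), exactly the four Python variables
def get_shifts_and_sizes_alt (spec_str : String) (encoding_size : Int) : (List (String × Int × Int)) × Int :=
  let r := (spec_str.toList ++ ['+']).foldl
    (fun (acc : List (String × Int × Int) × Int × List Char × Int) c =>
      if c = '+' then
        let size := if acc.2.2.1 = ['.'] then (1 : Int) else acc.2.2.2
        (acc.1 ++ [(String.ofList acc.2.2.1, size, acc.2.1)], acc.2.1 + size, [], encoding_size)
      else
        (acc.1, acc.2.1, acc.2.2.1 ++ [c], if c = 'x' then acc.2.2.2 * encoding_size else acc.2.2.2))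
    ([], 0, [], encoding_size)
  (r.1, r.2.1)

-- ===== PRECONDITION & SPEC =====
def Spec_get_shifts_and_sizes (spec_str : String) (encoding_size : Int) (out : (List (String × Int × Int)) × Int) : Prop := out = get_shifts_and_sizes_alt spec_str encoding_size
instance (spec_str : String) (encoding_size : Int) (out : (List (String × Int × Int)) × Int) : Decidable (Spec_get_shifts_and_sizes spec_str encoding_size out) := by unfold Spec_get_shifts_and_sizes; infer_instance

-- ===== CLAIM =====
def Claim_equal_get_shifts_and_sizes : Prop := ∀ (spec_str : String) (encoding_size : Int), Dom_get_shifts_and_sizes spec_str encoding_size → Spec_get_shifts_and_sizes spec_str encoding_size (get_shifts_and_sizes spec_str encoding_size)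

-- ===== LEMMAS AND PROOFS =====

-- fuel-free model of PySem.Chars.splitOn.go for a single-character separator
def pvSplitAux (c : Char) : List Char → List Char → List (List Char)
  | [], cur => [cur.reverse]
  | d :: rest, cur => if d = c then cur.reverse :: pvSplitAux c rest [] else pvSplitAux c rest (d :: cur)

theorem pvSplitAux_ne_nil (c : Char) (l cur : List Char) : pvSplitAux c l cur ≠ [] := by
  induction l generalizing cur with
  | nil => simp [pvSplitAux]
  | cons d rest ih => simp only [pvSplitAux]; split <;> simp [ih]

theorem splitOn_go_eq (c : Char) (fuel : Nat) (l cur : List Char) (acc : List (List Char))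
    (h : l.length ≤ fuel) :
    PySem.Chars.splitOn.go [c] fuel l cur acc = acc.reverse ++ pvSplitAux c l cur := by
  induction fuel generalizing l cur acc with
  | zero =>
      have : l = [] := by cases l <;> simp_all
      subst this
      simp [PySem.Chars.splitOn.go, pvSplitAux]
  | succ f ih =>
      cases l with
      | nil => simp [PySem.Chars.splitOn.go, pvSplitAux]
      | cons d rest =>
          have hr : rest.length ≤ f := by simpa using h
          by_cases hdc : d = c
          · subst hdc
            have hpre : [d].isPrefixOf (d :: rest) = true := by simp [List.isPrefixOf]
            have hdrop : List.drop [d].length (d :: rest) = rest := rfl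
            simp only [PySem.Chars.splitOn.go, hpre, if_true, hdrop]
            rw [ih rest [] (cur.reverse :: acc) hr]
            simp [pvSplitAux]
          · have hpre : [c].isPrefixOf (d :: rest) = false := by
              simp [List.isPrefixOf]
              exact fun h => hdc h.symm
            simp only [PySem.Chars.splitOn.go, hpre, Bool.false_eq_true, if_false]
            rw [ih rest (d :: cur) acc hr]
            simp [pvSplitAux, hdc]

theorem splitOn_eq (c : Char) (l : List Char) :
    PySem.Chars.splitOn l [c] = pvSplitAux c l [] := by
  have := splitOn_go_eq c (l.length + 1) l [] [] (by omega)
  simpa [PySem.Chars.splitOn] using this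

theorem join_pvSplitAux (c : Char) (l cur : List Char) :
    PySem.Chars.join [c] (pvSplitAux c l cur) = cur.reverse ++ l := by
  induction l generalizing cur with
  | nil => simp [pvSplitAux, PySem.Chars.join_singleton]
  | cons d rest ih =>
      simp only [pvSplitAux]
      by_cases hdc : d = c
      · subst hdc
        rw [if_pos rfl]
        obtain ⟨a, t, ht⟩ : ∃ a t, pvSplitAux d rest [] = a :: t := by
          cases h : pvSplitAux d rest [] with
          | nil => exact absurd h (pvSplitAux_ne_nil d rest [])
          | cons a t => exact ⟨a, t, rfl⟩
        rw [ht, PySem.Chars.join_cons_cons, ← ht, ih]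
        simp
      · rw [if_neg hdc, ih]
        simp

theorem length_pvSplitAux (c : Char) (l cur : List Char) :
    (pvSplitAux c l cur).length = 1 + l.count c := by
  induction l generalizing cur with
  | nil => simp [pvSplitAux]
  | cons d rest ih =>
      simp only [pvSplitAux]
      by_cases hdc : d = c
      · subst hdc
        simp [ih]
        omega
      · simp [hdc, ih]

-- per-part size, as a function of the raw part
def pvSize (encoding_size : Int) (p : List Char) : Int :=
  if p = ['.'] then 1 else encoding_size ^ (p.count 'x' + 1)

theorem size_eq (encoding_size : Int) (p : List Char) :
    (if (PySem.Chars.splitOn p ['x']).length = 1 ∧ (PySem.Chars.splitOn p ['x']).headD [] = ['.']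
      then (1 : Int) else encoding_size ^ (PySem.Chars.splitOn p ['x']).length)
    = pvSize encoding_size p := by
  rw [splitOn_eq]
  unfold pvSize
  by_cases hp : p = ['.']
  · subst hp
    simp [pvSplitAux]
  · rw [if_neg hp]
    have hguard : ¬ ((pvSplitAux 'x' p []).length = 1 ∧ (pvSplitAux 'x' p []).headD [] = ['.']) := by
      rintro ⟨h1, h2⟩
      obtain ⟨a, t, ht⟩ : ∃ a t, pvSplitAux 'x' p [] = a :: t := by
        cases h : pvSplitAux 'x' p [] with
        | nil => exact absurd h (pvSplitAux_ne_nil 'x' p [])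
        | cons a t => exact ⟨a, t, rfl⟩
      rw [ht] at h1 h2
      have ht0 : t = [] := by simpa using h1
      subst ht0
      simp at h2
      subst h2
      have := join_pvSplitAux 'x' p []
      rw [ht] at this
      rw [PySem.Chars.join_singleton] at this
      simp at this
      exact hp this.symm
    rw [if_neg hguard, length_pvSplitAux]
    ring_nf

theorem join_splitOn (p : List Char) :
    PySem.Chars.join ['x'] (PySem.Chars.splitOn p ['x']) = p := by
  rw [splitOn_eq, join_pvSplitAux]; simp

-- A's loop, over raw parts, with pvSize
def foldA (E : Int) (parts : List (List Char)) (st : List (String × Int × Int) × Int) :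
    List (String × Int × Int) × Int :=
  parts.foldl
    (fun acc p => (acc.1 ++ [(String.ofList p, pvSize E p, acc.2)], acc.2 + pvSize E p)) st

-- B's char scan, started with any buffer whose running size is correct, computes
-- exactly A's loop over the parts that splitting the remaining input would yield
theorem scan_eq (E : Int) (l : List Char) :
    ∀ (specs : List (String × Int × Int)) (shift : Int) (buf : List Char),
    (l ++ ['+']).foldl
      (fun (acc : List (String × Int × Int) × Int × List Char × Int) c =>
        if c = '+' then
          let size := if acc.2.2.1 = ['.'] then (1 : Int) else acc.2.2.2
          (acc.1 ++ [(String.ofList acc.2.2.1, size, acc.2.1)], acc.2.1 + size, [], E)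
        else
          (acc.1, acc.2.1, acc.2.2.1 ++ [c], if c = 'x' then acc.2.2.2 * E else acc.2.2.2))
      (specs, shift, buf, E ^ (buf.count 'x' + 1))
    = ((foldA E (pvSplitAux '+' l buf.reverse) (specs, shift)).1,
       (foldA E (pvSplitAux '+' l buf.reverse) (specs, shift)).2, [], E) := by
  induction l with
  | nil =>
      intro specs shift buf
      simp only [List.nil_append, List.foldl_cons, List.foldl_nil]
      have : pvSplitAux '+' [] buf.reverse = [buf] := by simp [pvSplitAux]
      rw [this]
      simp [foldA, pvSize]
  | cons d rest ih =>
      intro specs shift buf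
      by_cases hd : d = '+'
      · subst hd
        simp only [List.cons_append, List.foldl_cons]
        have hsplit : pvSplitAux '+' ('+' :: rest) buf.reverse = buf :: pvSplitAux '+' rest [] := by
          simp [pvSplitAux]
        rw [hsplit]
        simp only [if_true]
        have h1 : E ^ (([] : List Char).count 'x' + 1) = E := by simp
        have := ih (specs ++ [(String.ofList buf, if buf = ['.'] then 1 else E ^ (buf.count 'x' + 1), shift)])
          (shift + (if buf = ['.'] then 1 else E ^ (buf.count 'x' + 1))) []
        rw [h1] at this
        simp only [List.reverse_nil] at this
        rw [this]
        simp [foldA, pvSize]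
      · simp only [List.cons_append, List.foldl_cons, if_neg hd]
        have hsplit : pvSplitAux '+' (d :: rest) buf.reverse = pvSplitAux '+' rest (buf ++ [d]).reverse := by
          simp [pvSplitAux, hd]
        rw [hsplit]
        have hsz : (if d = 'x' then E ^ (buf.count 'x' + 1) * E else E ^ (buf.count 'x' + 1))
            = E ^ ((buf ++ [d]).count 'x' + 1) := by
          by_cases hx : d = 'x'
          · subst hx
            simp [List.count_append, pow_succ]
          · simp [List.count_append, hx]
        rw [hsz]
        exact ih specs shift (buf ++ [d])

-- ===== VERDICT =====
theorem get_shifts_and_sizes_spec : Claim_equal_get_shifts_and_sizes := by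
  intro spec_str encoding_size _
  unfold Spec_get_shifts_and_sizes get_shifts_and_sizes get_shifts_and_sizes_alt
  have hA :
      ((PySem.Chars.splitOn spec_str.toList ['+']).map (fun x => PySem.Chars.splitOn x ['x'])).foldl
        (fun (acc : List (String × Int × Int) × Int) x =>
          (acc.1 ++ [(String.ofList (PySem.Chars.join ['x'] x),
              if x.length = 1 ∧ x.headD [] = ['.'] then (1 : Int) else encoding_size ^ x.length, acc.2)],
            acc.2 + (if x.length = 1 ∧ x.headD [] = ['.'] then (1 : Int) else encoding_size ^ x.length)))
        ([], 0)
      = foldA encoding_size (PySem.Chars.splitOn spec_str.toList ['+']) ([], 0) := by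
    unfold foldA
    rw [List.foldl_map]
    congr 1
    funext acc p
    rw [size_eq, join_splitOn]
  have hB := scan_eq encoding_size spec_str.toList ([] : List (String × Int × Int)) 0 []
  simp only [List.reverse_nil] at hB
  have h1 : encoding_size ^ (([] : List Char).count 'x' + 1) = encoding_size := by simp
  rw [h1] at hB
  simp only [splitOn_eq] at hA
  simp only [splitOn_eq, hB, hA]
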